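-- pv_equiv track=rewrite | github.com/GuilhermeP96/python-gpu-statistical-analysis | src/gpu_stats.py | calculate_delays
-- ===== SOURCE A (Python) =====
-- from typing import Dict, Any, Optional, List
--
-- def calculate_delays(
--
--     data: List[List[int]],
--     n_items: int = 60
-- ) -> Dict[int, int]:
--     """
--     Calculate delay (time since last occurrence) for each item.
--
--     Args:
--         data: List of samples
--         n_items: Total number of possible items
--
--     Returns:
--         Dictionary mapping item to delay count
--     """
--     delays = {}
--
--     for item in range(1, n_items + 1):
--         delay = 0
--         for sample in reversed(data):
--             if item in sample:
--                 break
--             delay += 1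
--         delays[item] = delay
--
--     return delays
-- ===== SOURCE B (Python) =====
-- def calculate_delays(data, n_items=60):
--     # Single reverse pass: record each item's first-seen reversed index once,
--     # then read the answers off for items 1..n_items (default = len(data)).
--     first = {}
--     for d, sample in enumerate(reversed(data)):
--         for item in sample:
--             if item not in first:
--                 first[item] = d
--     n = len(data)
--     return {item: first.get(item, n) for item in range(1, n_items + 1)}
-- ===== Notes on version B (the rewrite author's own statement) =====
-- stated objective: faster
-- what changed: Instead of scanning reversed(data) once per item (n_items nested scans), B makes a single reverse pass recording each item's first-seen distance in a dict, then builds the result by lookup with default len(data).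
import Mathlib
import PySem

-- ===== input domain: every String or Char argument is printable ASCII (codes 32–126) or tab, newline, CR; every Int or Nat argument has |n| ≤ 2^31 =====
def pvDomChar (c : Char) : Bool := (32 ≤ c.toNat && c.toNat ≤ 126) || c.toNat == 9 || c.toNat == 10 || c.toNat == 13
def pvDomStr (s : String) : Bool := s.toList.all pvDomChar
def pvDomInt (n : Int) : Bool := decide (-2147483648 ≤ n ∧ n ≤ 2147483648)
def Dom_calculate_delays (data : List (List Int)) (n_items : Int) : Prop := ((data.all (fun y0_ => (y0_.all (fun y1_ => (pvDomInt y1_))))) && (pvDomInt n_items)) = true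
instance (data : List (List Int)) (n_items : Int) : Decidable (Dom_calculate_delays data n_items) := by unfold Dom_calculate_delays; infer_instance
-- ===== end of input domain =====

-- B replaces A's per-item scan of reversed(data) by one reverse pass recording first-seen distances (faster, asymptotic change).

-- ===== PORT A =====
-- inner loop of A: delay = 0; for sample in reversed(data): if item in sample: break; delay += 1
def aDelay (item : Int) : List (List Int) → Int
  | [] => 0
  | s :: rest => if item ∈ s then 0 else aDelay item rest + 1

def calculate_delays (data : List (List Int)) (n_items : Int) : List (Int × Int) :=
  ((PySem.List.pyRange 1 (n_items + 1) 1).foldl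
    (fun (d : PySem.Dict Int Int) item => d.insert item (aDelay item data.reverse))
    PySem.Dict.empty).items

-- ===== PORT B =====
-- B's first pass: first = {}; for d, sample in enumerate(reversed(data)): for item in sample: if item not in first: first[item] = d
def bFirst (data : List (List Int)) : PySem.Dict Int Int :=
  (PySem.List.enumerate data.reverse 0).foldl
    (fun f p => p.2.foldl (fun f x => if f.contains x then f else f.insert x p.1) f)
    PySem.Dict.empty

-- then: return {item: first.get(item, len(data)) for item in range(1, n_items + 1)}
def calculate_delays_alt (data : List (List Int)) (n_items : Int) : List (Int × Int) :=
  ((PySem.List.pyRange 1 (n_items + 1) 1).foldl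
    (fun (d : PySem.Dict Int Int) item => d.insert item ((bFirst data).getD item (data.length : Int)))
    PySem.Dict.empty).items

-- ===== PRECONDITION & SPEC =====
def Spec_calculate_delays (data : List (List Int)) (n_items : Int) (out : List (Int × Int)) : Prop := out = calculate_delays_alt data n_items
instance (data : List (List Int)) (n_items : Int) (out : List (Int × Int)) : Decidable (Spec_calculate_delays data n_items out) := by unfold Spec_calculate_delays; infer_instance

-- ===== CLAIM (what is proved, stated in full; the proofs are below) =====
def Claim_equal_calculate_delays : Prop := ∀ (data : List (List Int)) (n_items : Int), Dom_calculate_delays data n_items → Spec_calculate_delays data n_items (calculate_delays data n_items)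

-- ===== LEMMAS AND PROOFS =====

-- inner loop of B's first pass
lemma inner_get? (s : List Int) (d : Int) (f : PySem.Dict Int Int) (x : Int) :
    (s.foldl (fun f x => if f.contains x then f else f.insert x d) f).get? x =
      if f.contains x then f.get? x else if x ∈ s then some d else none := by
  induction s generalizing f with
  | nil =>
    cases hf : f.contains x
    · simp [(PySem.Dict.get?_eq_none_iff_contains f x).mpr hf]
    · simp
  | cons y s ih =>
    simp only [List.foldl_cons]
    by_cases hy : f.contains y = true
    · rw [if_pos hy, ih]
      by_cases hx : f.contains x = true
      · simp [hx]
      · simp only [hx, if_neg, Bool.false_eq_true, not_false_iff]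
        by_cases hxy : x = y
        · subst hxy; exact absurd hy (by simp [hx])
        · simp [List.mem_cons, hxy]
    · rw [if_neg hy, ih]
      by_cases hxy : x = y
      · subst hxy
        simp [PySem.Dict.get?_insert_self,
          Bool.eq_false_iff.mp (Bool.not_eq_true _ ▸ hy)]
      · rw [PySem.Dict.contains_insert, PySem.Dict.get?_insert_of_ne _ _ hxy]
        simp [hxy, List.mem_cons]

-- outer loop of B's first pass, over enumerate with any start
lemma outer_get? (l : List (List Int)) (d0 : Int) (f : PySem.Dict Int Int) (x : Int) :
    ((PySem.List.enumerate l d0).foldl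
        (fun f p => p.2.foldl (fun f x => if f.contains x then f else f.insert x p.1) f) f).get? x =
      if f.contains x then f.get? x
      else if l.any (fun s => decide (x ∈ s)) then some (d0 + aDelay x l) else none := by
  induction l generalizing d0 f with
  | nil =>
    cases hf : f.contains x
    · simp [(PySem.Dict.get?_eq_none_iff_contains f x).mpr hf]
    · simp
  | cons s rest ih =>
    rw [PySem.List.enumerate_cons, List.foldl_cons, ih]
    have hc := PySem.Dict.contains_eq_isSome_get?
      (s.foldl (fun f x => if f.contains x then f else f.insert x d0) f) x
    rw [hc, inner_get? s d0 f x]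
    by_cases hf : f.contains x = true
    · have : (f.get? x).isSome = true := by
        rw [← PySem.Dict.contains_eq_isSome_get?]; exact hf
      simp [hf, this]
    · have hn : f.get? x = none := (PySem.Dict.get?_eq_none_iff_contains f x).mpr
        (Bool.not_eq_true _ ▸ hf)
      by_cases hs : x ∈ s
      · simp [hf, hs, aDelay]
      · have hany : ((s :: rest).any fun t => decide (x ∈ t)) = (rest.any fun t => decide (x ∈ t)) := by
          simp [hs]
        simp only [hf, Bool.false_eq_true, hn, Option.isSome_none, aDelay, hs,
          if_neg, not_false_iff, hany]
        by_cases hr : (rest.any fun t => decide (x ∈ t)) = true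
        · simp only [hr, if_true]
          congr 1; omega
        · simp [hr]

-- if item occurs in no sample, A's delay is the full length
lemma aDelay_not_found (x : Int) (l : List (List Int))
    (h : l.any (fun s => decide (x ∈ s)) = false) : aDelay x l = (l.length : Int) := by
  induction l with
  | nil => simp [aDelay]
  | cons s rest ih =>
    simp only [List.any_cons, Bool.or_eq_false_iff, decide_eq_false_iff_not] at h
    simp [aDelay, h.1, ih h.2]

-- B's lookup equals A's per-item delay
lemma first_getD (data : List (List Int)) (x : Int) :
    (bFirst data).getD x (data.length : Int) = aDelay x data.reverse := by
  rw [PySem.Dict.getD_eq_get?_getD, bFirst, outer_get?]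
  simp only [PySem.Dict.contains_empty, Bool.false_eq_true, if_false]
  by_cases h : data.reverse.any (fun s => decide (x ∈ s)) = true
  · simp [h]
  · simp only [Bool.not_eq_true] at h
    rw [aDelay_not_found x _ h]
    simp [h]

-- ===== VERDICT (by name: the statement is the Claim_ definition above) =====
theorem calculate_delays_spec : Claim_equal_calculate_delays := by
  intro data n_items _
  show _ = _
  unfold calculate_delays calculate_delays_alt
  rw [PySem.Dict.items_foldl_insert_fresh (PySem.List.pyRange 1 (n_items + 1) 1)
        (fun a => a) (fun a => aDelay a data.reverse) PySem.Dict.empty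
        (by intro a _; simp) (by simpa using PySem.List.nodup_pyRange_one 1 (n_items + 1)),
      PySem.Dict.items_foldl_insert_fresh (PySem.List.pyRange 1 (n_items + 1) 1)
        (fun a => a) (fun a => (bFirst data).getD a (data.length : Int)) PySem.Dict.empty
        (by intro a _; simp) (by simpa using PySem.List.nodup_pyRange_one 1 (n_items + 1))]
  refine congrArg _ (List.map_congr_left ?_)
  intro item _
  exact congrArg _ (first_getD data item).symm
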